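-- pv_equiv track=rewrite | github.com/IgorKon/ProjectEuler | 093.py | CalcNaturals
-- ===== SOURCE A (Python) =====
-- def CalcNaturals(nums):
--     count = 0
--     i = 1
--     bFound = True
--     while bFound:
--         if i in nums:
--             count += 1
--             i += 1
--             bFound = True
--         else:
--             bFound = False
--     return count
-- ===== SOURCE B (Python) =====
-- def CalcNaturals(nums):
--     expected = 1
--     for v in sorted(set(nums)):
--         if v == expected:
--             expected += 1
--         elif v > expected:
--             break
--     return expected - 1
-- ===== Notes on version B (the rewrite author's own statement) =====
-- stated objective: alternative
-- what changed: Replaces the probe loop that tests i=1,2,3,... with 'i in nums' (a linear scan per probe) by building set(nums) once and making a single forward pass over sorted(set(nums)) with an 'expected' counter.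
import Mathlib
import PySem

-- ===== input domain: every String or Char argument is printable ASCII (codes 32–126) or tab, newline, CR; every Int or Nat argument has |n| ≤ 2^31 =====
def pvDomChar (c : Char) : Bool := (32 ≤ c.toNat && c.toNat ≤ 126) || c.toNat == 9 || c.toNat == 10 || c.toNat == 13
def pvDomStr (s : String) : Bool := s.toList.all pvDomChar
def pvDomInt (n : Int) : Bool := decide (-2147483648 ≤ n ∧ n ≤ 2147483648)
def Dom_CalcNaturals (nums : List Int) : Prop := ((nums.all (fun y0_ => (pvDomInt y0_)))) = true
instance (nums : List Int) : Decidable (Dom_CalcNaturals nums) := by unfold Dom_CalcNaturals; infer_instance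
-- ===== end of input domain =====

-- B replaces A's probe loop (test i = 1,2,3,... with an 'i in nums' scan each time) by one
-- sorted pass over set(nums) with an 'expected' counter (objective: alternative algorithm).


-- ===== PORT A =====
-- A's while loop, fuel = nums.length + 1 (only for totality: the loop succeeds at most
-- nums.length times, proved in CalcNaturalsLoop_good below).
def CalcNaturalsLoop (nums : List Int) (count i : Int) : Nat → Int
  | 0 => count
  | f + 1 =>
    if i ∈ nums then CalcNaturalsLoop nums (count + 1) (i + 1) f
    else count

def CalcNaturals (nums : List Int) : Int :=
  CalcNaturalsLoop nums 0 1 (nums.length + 1)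

-- ===== PORT B =====
-- the for-loop of Source B over sorted(set(nums)) with the 'expected' counter ('break' = return expected-1)
def CalcNaturalsAltGo : List Int → Int → Int
  | [], expected => expected - 1
  | v :: t, expected =>
    if v = expected then CalcNaturalsAltGo t (expected + 1)
    else if v > expected then expected - 1
    else CalcNaturalsAltGo t expected

def CalcNaturals_alt (nums : List Int) : Int :=
  CalcNaturalsAltGo (PySem.List.sorted (PySem.Set.ofList nums) (fun x => x) false) 1

-- ===== PRECONDITION & SPEC =====
def Spec_CalcNaturals (nums : List Int) (out : Int) : Prop := out = CalcNaturals_alt nums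
instance (nums : List Int) (out : Int) : Decidable (Spec_CalcNaturals nums out) := by unfold Spec_CalcNaturals; infer_instance

-- ===== CLAIM (what is proved, stated in full; the proofs are below) =====
def Claim_equal_CalcNaturals : Prop := ∀ (nums : List Int), Dom_CalcNaturals nums → Spec_CalcNaturals nums (CalcNaturals nums)

-- ===== LEMMAS AND PROOFS =====

-- r is "the count of consecutive naturals from 1 in nums"
def GoodCount (nums : List Int) (r : Int) : Prop :=
  0 ≤ r ∧ (∀ k : Int, 1 ≤ k → k ≤ r → k ∈ nums) ∧ (r + 1) ∉ nums

theorem goodCount_unique {nums : List Int} {r₁ r₂ : Int}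
    (h₁ : GoodCount nums r₁) (h₂ : GoodCount nums r₂) : r₁ = r₂ := by
  obtain ⟨n₁, p₁, a₁⟩ := h₁
  obtain ⟨n₂, p₂, a₂⟩ := h₂
  rcases lt_trichotomy r₁ r₂ with h | h | h
  · exact absurd (p₂ (r₁ + 1) (by omega) (by omega)) a₁
  · exact h
  · exact absurd (p₁ (r₂ + 1) (by omega) (by omega)) a₂

theorem prefix_le_length {nums : List Int} {c : Int}
    (h : ∀ k : Int, 1 ≤ k → k ≤ c → k ∈ nums) : c ≤ nums.length := by
  by_cases hc : c ≤ 0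
  · omega
  · have hsub : Finset.Icc (1 : Int) c ⊆ nums.toFinset := by
      intro k hk
      rw [Finset.mem_Icc] at hk
      exact List.mem_toFinset.mpr (h k hk.1 hk.2)
    have hcard := Finset.card_le_card hsub
    rw [Int.card_Icc] at hcard
    have := List.toFinset_card_le nums
    omega

theorem CalcNaturalsLoop_good (nums : List Int) :
    ∀ (f : Nat) (c : Int), 0 ≤ c → (∀ k : Int, 1 ≤ k → k ≤ c → k ∈ nums) →
    c + f = nums.length + 1 → GoodCount nums (CalcNaturalsLoop nums c (c + 1) f) := by
  intro f
  induction f with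
  | zero =>
    intro c _ hpre hf
    exact absurd (prefix_le_length hpre) (by push_cast at hf; omega)
  | succ f ih =>
    intro c hc hpre hf
    rw [CalcNaturalsLoop]
    by_cases hmem : (c + 1) ∈ nums
    · rw [if_pos hmem]
      have hpre' : ∀ k : Int, 1 ≤ k → k ≤ c + 1 → k ∈ nums := by
        intro k h1 h2
        rcases eq_or_lt_of_le h2 with h | h
        · exact h ▸ hmem
        · exact hpre k h1 (by omega)
      have := ih (c + 1) (by omega) hpre' (by push_cast at hf ⊢; omega)
      simpa [add_assoc] using this
    · rw [if_neg hmem]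
      exact ⟨hc, hpre, hmem⟩

theorem CalcNaturalsAltGo_good (nums : List Int) :
    ∀ (xs : List Int) (e : Int), xs.Pairwise (· < ·) → 1 ≤ e →
    (∀ k : Int, 1 ≤ k → k ≤ e - 1 → k ∈ nums) →
    (∀ v ∈ nums, e ≤ v → v ∈ xs) →
    (∀ v ∈ xs, v ∈ nums) →
    GoodCount nums (CalcNaturalsAltGo xs e) := by
  intro xs
  induction xs with
  | nil =>
    intro e _ he hpre hrest _
    rw [CalcNaturalsAltGo]
    refine ⟨by omega, by intro k h1 h2; exact hpre k h1 (by omega), ?_⟩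
    intro hmem
    exact absurd (hrest _ (by simpa using hmem) (by omega)) (List.not_mem_nil)
  | cons v t ih =>
    intro e hpw he hpre hrest hsub
    have hpwt := (List.pairwise_cons.mp hpw).2
    have hvlt := (List.pairwise_cons.mp hpw).1
    rw [CalcNaturalsAltGo]
    by_cases hv : v = e
    · rw [if_pos hv]
      refine ih (e + 1) hpwt (by omega) ?_ ?_ (fun w hw => hsub w (List.mem_cons_of_mem _ hw))
      · intro k h1 h2
        rcases eq_or_lt_of_le h2 with h | h
        · have : k = v := by omega
          exact this ▸ hsub v List.mem_cons_self
        · exact hpre k h1 (by omega)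
      · intro w hw hle
        rcases List.mem_cons.mp (hrest w hw (by omega)) with h | h
        · omega
        · exact h
    · rw [if_neg hv]
      by_cases hgt : v > e
      · rw [if_pos hgt]
        refine ⟨by omega, by intro k h1 h2; exact hpre k h1 (by omega), ?_⟩
        intro hmem
        have : (e - 1) + 1 ∈ v :: t := hrest _ (by simpa using hmem) (by omega)
        rcases List.mem_cons.mp this with h | h
        · omega
        · exact absurd (hvlt _ h) (by omega)
      · rw [if_neg hgt]
        refine ih e hpwt he hpre ?_ (fun w hw => hsub w (List.mem_cons_of_mem _ hw))
        intro w hw hle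
        rcases List.mem_cons.mp (hrest w hw hle) with h | h
        · omega
        · exact h

theorem CalcNaturals_good (nums : List Int) : GoodCount nums (CalcNaturals nums) := by
  have := CalcNaturalsLoop_good nums (nums.length + 1) 0 le_rfl (by intro k h1 h2; omega)
    (by push_cast; ring)
  simpa [CalcNaturals, zero_add] using this

theorem CalcNaturals_alt_good (nums : List Int) : GoodCount nums (CalcNaturals_alt nums) := by
  have hmemx : ∀ v : Int, v ∈ PySem.List.sorted (PySem.Set.ofList nums) (fun x => x) false ↔ v ∈ nums := by
    intro v
    rw [PySem.List.mem_sorted, PySem.Set.mem_ofList]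
  refine CalcNaturalsAltGo_good nums _ 1 (PySem.List.sorted_ofList_pairwise_lt nums) le_rfl
    (by intro k h1 h2; omega) ?_ ?_
  · intro v hv _; exact (hmemx v).mpr hv
  · intro v hv; exact (hmemx v).mp hv

-- ===== VERDICT (by name: the statement is the Claim_ definition above) =====
theorem CalcNaturals_spec : Claim_equal_CalcNaturals := by
  intro nums _
  exact goodCount_unique (CalcNaturals_good nums) (CalcNaturals_alt_good nums)
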